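-- pv_equiv track=rewrite | github.com/SirhanMacx/eduagent | clawed/memory_engine.py | _append_to_section
-- ===== SOURCE A (Python) =====
-- SECTION_GENERATION_STATS = "Generation Statistics"
--
-- def _append_to_section(content: str, section_name: str, entry: str) -> str:
--     """Append a bullet point to a section in memory.md content.
--
--     If the section exists, inserts after the heading (replacing placeholder if present).
--     If the section doesn't exist, appends it at the end.
--     """
--     heading = f"## {section_name}"
--
--     if heading not in content:
--         # Append new section before Generation Statistics (if present) or at end
--         stats_heading = f"## {SECTION_GENERATION_STATS}"
--         if stats_heading in content:
--             content = content.replace(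
--                 stats_heading,
--                 f"{heading}\n- {entry}\n\n{stats_heading}",
--             )
--         else:
--             content = content.rstrip() + f"\n\n{heading}\n- {entry}\n"
--         return content
--
--     lines = content.split("\n")
--     new_lines: list[str] = []
--     found_heading = False
--     inserted = False
--
--     for line in lines:
--         if line.strip() == heading or line.strip().startswith(heading):
--             found_heading = True
--             new_lines.append(line)
--             continue
--
--         if found_heading and not inserted:
--             stripped = line.strip()
--             # Check if this line is a placeholder
--             if stripped.startswith("*(") and stripped.endswith(")*"):
--                 new_lines.append(f"- {entry}")
--                 inserted = True
--                 continue
--             # Check if we've hit the next section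
--             elif stripped.startswith("## ") or stripped.startswith("# "):
--                 new_lines.append(f"- {entry}")
--                 new_lines.append("")
--                 inserted = True
--                 new_lines.append(line)
--                 continue
--             else:
--                 new_lines.append(line)
--                 continue
--         else:
--             new_lines.append(line)
--
--     if found_heading and not inserted:
--         new_lines.append(f"- {entry}")
--
--     return "\n".join(new_lines)
-- ===== SOURCE B (Python) =====
-- SECTION_GENERATION_STATS = "Generation Statistics"
--
-- def _append_to_section(content: str, section_name: str, entry: str) -> str:
--     heading = f"## {section_name}"
--
--     if heading not in content:
--         stats_heading = f"## {SECTION_GENERATION_STATS}"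
--         if stats_heading in content:
--             return content.replace(
--                 stats_heading,
--                 f"{heading}\n- {entry}\n\n{stats_heading}",
--             )
--         return content.rstrip() + f"\n\n{heading}\n- {entry}\n"
--
--     lines = content.split("\n")
--
--     def matches(line: str) -> bool:
--         return line.strip().startswith(heading)
--
--     i = 0
--     while i < len(lines) and not matches(lines[i]):
--         i += 1
--     if i == len(lines):
--         # heading occurs only inside a line, never as a heading line: nothing to insert
--         return "\n".join(lines)
--
--     bullet = f"- {entry}"
--     j = i + 1
--     while j < len(lines):
--         if matches(lines[j]):  # repeated heading lines are consumed, not boundaries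
--             j += 1
--             continue
--         s = lines[j].strip()
--         if s.startswith("*(") and s.endswith(")*"):
--             return "\n".join(lines[:j] + [bullet] + lines[j + 1:])
--         if s.startswith("## ") or s.startswith("# "):
--             return "\n".join(lines[:j] + [bullet, ""] + lines[j:])
--         j += 1
--     return "\n".join(lines + [bullet])
-- ===== Notes on version B (the rewrite author's own statement) =====
-- stated objective: alternative
-- what changed: The flag-driven per-line rebuild (found/inserted booleans and an accumulator list) is replaced by two index searches (first heading line, then first placeholder/next-section trigger) followed by a single list splice with slicing and early returns; the no-heading branch is kept as-is.
import Mathlib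
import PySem

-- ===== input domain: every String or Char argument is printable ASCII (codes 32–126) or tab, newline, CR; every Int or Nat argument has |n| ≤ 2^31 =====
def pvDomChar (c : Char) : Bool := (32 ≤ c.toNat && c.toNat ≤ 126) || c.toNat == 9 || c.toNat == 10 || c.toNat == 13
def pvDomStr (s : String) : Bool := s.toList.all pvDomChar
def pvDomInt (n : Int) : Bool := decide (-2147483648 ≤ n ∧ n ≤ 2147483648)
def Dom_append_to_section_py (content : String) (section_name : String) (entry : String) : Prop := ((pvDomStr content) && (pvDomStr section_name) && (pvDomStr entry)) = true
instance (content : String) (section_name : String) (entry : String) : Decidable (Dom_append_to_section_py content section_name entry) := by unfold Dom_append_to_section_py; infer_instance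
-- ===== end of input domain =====

-- B replaces A's flag-driven per-line rebuild by two index searches plus one slice-splice; same cost, different decomposition.

-- ===== PORT A =====
-- the for-loop of A: state (found, inserted), the trailing "if found and not inserted: append" folded into the base case
def pvALoop (heading e : List Char) : List (List Char) → Bool → Bool → List (List Char)
  | [], found, inserted => if found && !inserted then [e] else []
  | l :: rest, found, inserted =>
    if PySem.Chars.strip l == heading || PySem.Chars.startswith (PySem.Chars.strip l) heading then
      l :: pvALoop heading e rest true inserted
    else if found && !inserted then
      let s := PySem.Chars.strip l
      if PySem.Chars.startswith s "*(".toList && PySem.Chars.endswith s ")*".toList then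
        e :: pvALoop heading e rest found true
      else if PySem.Chars.startswith s "## ".toList || PySem.Chars.startswith s "# ".toList then
        e :: [] :: l :: pvALoop heading e rest found true
      else
        l :: pvALoop heading e rest found inserted
    else
      l :: pvALoop heading e rest found inserted

def append_to_section_py (content : String) (section_name : String) (entry : String) : String :=
  let heading := "## " ++ section_name
  if !(PySem.Str.isIn heading content) then
    let stats_heading := "## Generation Statistics"
    if PySem.Str.isIn stats_heading content then
      PySem.Str.replace content stats_heading (heading ++ "\n- " ++ entry ++ "\n\n" ++ stats_heading)
    else
      PySem.Str.rstrip content ++ "\n\n" ++ heading ++ "\n- " ++ entry ++ "\n"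
  else
    let lines := PySem.Chars.splitOn content.toList "\n".toList
    String.ofList (PySem.Chars.join "\n".toList
      (pvALoop heading.toList ("- ".toList ++ entry.toList) lines false false))

-- ===== PORT B =====
-- B's first while loop: index of the first line whose strip starts with the heading
def pvFindHead (heading : List Char) : List (List Char) → Option Nat
  | [] => none
  | l :: rest =>
    if PySem.Chars.startswith (PySem.Chars.strip l) heading then some 0
    else (pvFindHead heading rest).map (· + 1)

-- B's second while loop: offset of the first trigger line (true = placeholder, false = next section)
def pvFindTrig (heading : List Char) : List (List Char) → Option (Nat × Bool)
  | [] => none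
  | l :: rest =>
    if PySem.Chars.startswith (PySem.Chars.strip l) heading then
      (pvFindTrig heading rest).map (fun p => (p.1 + 1, p.2))
    else
      let s := PySem.Chars.strip l
      if PySem.Chars.startswith s "*(".toList && PySem.Chars.endswith s ")*".toList then some (0, true)
      else if PySem.Chars.startswith s "## ".toList || PySem.Chars.startswith s "# ".toList then some (0, false)
      else (pvFindTrig heading rest).map (fun p => (p.1 + 1, p.2))

def append_to_section_py_alt (content : String) (section_name : String) (entry : String) : String :=
  let heading := "## " ++ section_name
  if !(PySem.Str.isIn heading content) then
    let stats_heading := "## Generation Statistics"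
    if PySem.Str.isIn stats_heading content then
      PySem.Str.replace content stats_heading (heading ++ "\n- " ++ entry ++ "\n\n" ++ stats_heading)
    else
      PySem.Str.rstrip content ++ "\n\n" ++ heading ++ "\n- " ++ entry ++ "\n"
  else
    let lines := PySem.Chars.splitOn content.toList "\n".toList
    let bullet := "- ".toList ++ entry.toList
    String.ofList (PySem.Chars.join "\n".toList
      (match pvFindHead heading.toList lines with
       | none => lines
       | some i =>
         match pvFindTrig heading.toList (lines.drop (i + 1)) with
         | none => lines ++ [bullet]
         | some (k, true) =>
           lines.take (i + 1 + k) ++ [bullet] ++ lines.drop (i + 1 + k + 1)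
         | some (k, false) =>
           lines.take (i + 1 + k) ++ [bullet, []] ++ lines.drop (i + 1 + k)))

-- ===== PRECONDITION & SPEC =====
def Spec_append_to_section_py (content : String) (section_name : String) (entry : String) (out : String) : Prop := out = append_to_section_py_alt content section_name entry
instance (content : String) (section_name : String) (entry : String) (out : String) : Decidable (Spec_append_to_section_py content section_name entry out) := by unfold Spec_append_to_section_py; infer_instance

-- ===== CLAIM (what is proved, stated in full; the proofs are below) =====
def Claim_equal_append_to_section_py : Prop := ∀ (content : String) (section_name : String) (entry : String), Dom_append_to_section_py content section_name entry → Spec_append_to_section_py content section_name entry (append_to_section_py content section_name entry)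

-- ===== LEMMAS AND PROOFS =====

-- A's heading test (== or startswith) coincides with B's (startswith alone)
theorem pvHead_cond (heading l : List Char) :
    (PySem.Chars.strip l == heading || PySem.Chars.startswith (PySem.Chars.strip l) heading)
      = PySem.Chars.startswith (PySem.Chars.strip l) heading := by
  by_cases h : PySem.Chars.strip l = heading
  · simp [h, PySem.Chars.startswith, List.isPrefixOf_iff_prefix]
  · simp [h]

-- after insertion A's loop copies the rest verbatim
theorem pvALoop_inserted (heading e : List Char) (lines : List (List Char)) (found : Bool) :
    pvALoop heading e lines found true = lines := by
  induction lines generalizing found with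
  | nil => simp [pvALoop]
  | cons l rest ih =>
    simp only [pvALoop, Bool.not_true, Bool.and_false, Bool.false_eq_true, if_false]
    split_ifs <;> simp [ih]

-- the found-not-yet-inserted phase of A's loop = B's trigger search + splice
theorem pvALoop_found (heading e : List Char) (lines : List (List Char)) :
    pvALoop heading e lines true false =
      match pvFindTrig heading lines with
      | none => lines ++ [e]
      | some (k, true) => lines.take k ++ [e] ++ lines.drop (k + 1)
      | some (k, false) => lines.take k ++ [e, []] ++ lines.drop k := by
  induction lines with
  | nil => simp [pvALoop, pvFindTrig]
  | cons l rest ih =>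
    simp only [pvALoop, pvFindTrig, pvHead_cond]
    cases hh : PySem.Chars.startswith (PySem.Chars.strip l) heading with
    | true =>
      simp only [if_true, ih]
      cases htr : pvFindTrig heading rest with
      | none => simp
      | some p => obtain ⟨k, b⟩ := p; cases b <;> simp
    | false =>
      simp only [Bool.false_eq_true, if_false, Bool.true_and, Bool.not_false]
      cases hp : (PySem.Chars.startswith (PySem.Chars.strip l) "*(".toList
          && PySem.Chars.endswith (PySem.Chars.strip l) ")*".toList) with
      | true => simp [pvALoop_inserted]
      | false =>
        simp only [Bool.false_eq_true, if_false]
        cases hs : (PySem.Chars.startswith (PySem.Chars.strip l) "## ".toList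
            || PySem.Chars.startswith (PySem.Chars.strip l) "# ".toList) with
        | true => simp [pvALoop_inserted]
        | false =>
          simp only [Bool.false_eq_true, if_false, ih]
          cases htr : pvFindTrig heading rest with
          | none => simp
          | some p => obtain ⟨k, b⟩ := p; cases b <;> simp

-- the searching phase of A's loop = B's heading search, then the found phase
theorem pvALoop_search (heading e : List Char) (lines : List (List Char)) :
    pvALoop heading e lines false false =
      match pvFindHead heading lines with
      | none => lines
      | some i => lines.take (i + 1) ++ pvALoop heading e (lines.drop (i + 1)) true false := by
  induction lines with
  | nil => simp [pvALoop, pvFindHead]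
  | cons l rest ih =>
    simp only [pvALoop, pvFindHead, pvHead_cond]
    cases hh : PySem.Chars.startswith (PySem.Chars.strip l) heading with
    | true => simp
    | false =>
      simp only [Bool.false_eq_true, if_false, Bool.false_and, ih]
      cases hf : pvFindHead heading rest with
      | none => simp
      | some i => simp [List.take_succ_cons, List.drop_succ_cons]

-- ===== VERDICT (by name: the statement is the Claim_ definition above) =====
theorem append_to_section_py_spec : Claim_equal_append_to_section_py := by
  intro content section_name entry _
  unfold Spec_append_to_section_py append_to_section_py append_to_section_py_alt
  cases hb : PySem.Str.isIn ("## " ++ section_name) content with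
  | false => simp only [hb, Bool.not_false, if_true]
  | true =>
    simp only [hb, Bool.not_true, Bool.false_eq_true, if_false]
    congr 2
    rw [pvALoop_search]
    cases hf : pvFindHead ("## " ++ section_name).toList
        (PySem.Chars.splitOn content.toList "\n".toList) with
    | none => simp
    | some i =>
      simp only []
      rw [pvALoop_found]
      cases htr : pvFindTrig ("## " ++ section_name).toList
          ((PySem.Chars.splitOn content.toList "\n".toList).drop (i + 1)) with
      | none => rw [← List.append_assoc, List.take_append_drop]
      | some p =>
        obtain ⟨k, b⟩ := p
        cases b with
        | true =>
          simp only []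
          conv_rhs => rw [List.take_add]
          have hd : (PySem.Chars.splitOn content.toList "\n".toList).drop (i + 1 + k + 1)
              = ((PySem.Chars.splitOn content.toList "\n".toList).drop (i + 1)).drop (k + 1) := by
            rw [List.drop_drop, Nat.add_assoc]
          rw [hd]
          simp [List.append_assoc]
        | false =>
          simp only []
          conv_rhs => rw [List.take_add]
          have hd : (PySem.Chars.splitOn content.toList "\n".toList).drop (i + 1 + k)
              = ((PySem.Chars.splitOn content.toList "\n".toList).drop (i + 1)).drop k := by
            rw [List.drop_drop]
          rw [hd]
          simp [List.append_assoc]
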